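-- pv_equiv track=rewrite | github.com/BenjamTorr/LongShortDiffusion | src/diffusion/unet_conditional_1d.py | _compute_lengths
-- ===== SOURCE A (Python) =====
-- def _compute_lengths(seq_len, down_sample_flags, kernel=4, stride=2, padding=1):
--     """Track sequence lengths after each down-sampling step."""
--     lengths = [seq_len]
--     length = seq_len
--     for flag in down_sample_flags:
--         if flag:
--             length = ((length + 2 * padding - (kernel - 1) - 1) // stride) + 1
--         lengths.append(length)
--     return lengths
-- ===== SOURCE B (Python) =====
-- def _compute_lengths(seq_len, down_sample_flags, kernel=4, stride=2, padding=1):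
--     """Track sequence lengths after each down-sampling step.
--
--     Two staged passes: first build a table of the distinct lengths (one entry per
--     applied down-sampling), then emit table[prefix count of truthy flags] per step.
--     """
--     table = [seq_len]
--     for _ in range(sum(1 for f in down_sample_flags if f)):
--         table.append(((table[-1] + 2 * padding - (kernel - 1) - 1) // stride) + 1)
--     result = [table[0]]
--     c = 0
--     for flag in down_sample_flags:
--         if flag:
--             c += 1
--         result.append(table[c])
--     return result
-- ===== Notes on version B (the rewrite author's own statement) =====
-- stated objective: alternative
-- what changed: Replaces A's single pass that updates a running length with two staged passes: first build a memo table of the distinct lengths (one per applied down-sampling), then emit table[prefix count of truthy flags] for each step.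
import Mathlib
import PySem

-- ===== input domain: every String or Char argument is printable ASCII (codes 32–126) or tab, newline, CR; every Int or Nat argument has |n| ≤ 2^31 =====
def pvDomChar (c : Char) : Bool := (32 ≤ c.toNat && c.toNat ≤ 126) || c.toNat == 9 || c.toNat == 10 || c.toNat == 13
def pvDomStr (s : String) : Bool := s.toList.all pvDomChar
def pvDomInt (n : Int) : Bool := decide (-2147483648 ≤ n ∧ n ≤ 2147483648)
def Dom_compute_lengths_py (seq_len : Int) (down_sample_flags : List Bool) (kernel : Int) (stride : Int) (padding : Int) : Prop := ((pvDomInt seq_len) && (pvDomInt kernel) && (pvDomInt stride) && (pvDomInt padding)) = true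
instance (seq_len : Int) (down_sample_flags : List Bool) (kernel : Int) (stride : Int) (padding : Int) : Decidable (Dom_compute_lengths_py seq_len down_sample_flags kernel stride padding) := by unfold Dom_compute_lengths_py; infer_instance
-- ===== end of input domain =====

-- B replaces A's single running-length pass with two staged passes: it first
-- builds a memo table of the distinct lengths (one per applied down-sampling),
-- then emits table[prefix count of truthy flags] for each step; same cost.

-- ===== PORT A =====
-- literal port of A's loop: state = (lengths so far, current length)
def compute_lengths_py (seq_len : Int) (down_sample_flags : List Bool) (kernel : Int) (stride : Int) (padding : Int) : List Int :=
  (down_sample_flags.foldl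
    (fun (st : List Int × Int) flag =>
      let length := if flag then PySem.Int.floordiv (st.2 + 2 * padding - (kernel - 1) - 1) stride + 1 else st.2
      (st.1 ++ [length], length))
    ([seq_len], seq_len)).1

-- ===== PORT B =====
-- pass 1 of Source B: table of distinct lengths, appending a step of table[-1] per truthy flag
-- (table.getLast! is exact for Python's table[-1]: the table is never empty)
def clBuildTable (kernel stride padding seq_len : Int) (n : Nat) : List Int :=
  (List.range n).foldl
    (fun t _ => t ++ [PySem.Int.floordiv (t.getLast! + 2 * padding - (kernel - 1) - 1) stride + 1])
    [seq_len]

def compute_lengths_py_alt (seq_len : Int) (down_sample_flags : List Bool) (kernel : Int) (stride : Int) (padding : Int) : List Int :=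
  let table := clBuildTable kernel stride padding seq_len (down_sample_flags.countP (fun f => f))
  -- pass 2: emit table[c] per flag; c stays < table.length, so getD's default is never used (exact for Python's table[c])
  (down_sample_flags.foldl
    (fun (st : List Int × Nat) flag =>
      let c := if flag then st.2 + 1 else st.2
      (st.1 ++ [table.getD c 0], c))
    ([table.getD 0 0], 0)).1

-- ===== PRECONDITION & SPEC =====
-- Pre_ excludes exactly the inputs where Python A raises ZeroDivisionError:
-- stride = 0 together with at least one truthy down-sample flag (B raises there too).
def Pre_compute_lengths_py (seq_len : Int) (down_sample_flags : List Bool) (kernel : Int) (stride : Int) (padding : Int) : Prop :=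
  stride ≠ 0 ∨ true ∉ down_sample_flags
instance (seq_len : Int) (down_sample_flags : List Bool) (kernel : Int) (stride : Int) (padding : Int) : Decidable (Pre_compute_lengths_py seq_len down_sample_flags kernel stride padding) := by unfold Pre_compute_lengths_py; infer_instance

def pvWitness_compute_lengths_py : Int × List Bool × Int × Int × Int := (32, [true, false, true], 4, 2, 1)

def Spec_compute_lengths_py (seq_len : Int) (down_sample_flags : List Bool) (kernel : Int) (stride : Int) (padding : Int) (out : List Int) : Prop := out = compute_lengths_py_alt seq_len down_sample_flags kernel stride padding
instance (seq_len : Int) (down_sample_flags : List Bool) (kernel : Int) (stride : Int) (padding : Int) (out : List Int) : Decidable (Spec_compute_lengths_py seq_len down_sample_flags kernel stride padding out) := by unfold Spec_compute_lengths_py; infer_instance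

-- ===== CLAIM (what is proved, stated in full; the proofs are below) =====
def Claim_equal_compute_lengths_py : Prop := ∀ (seq_len : Int) (down_sample_flags : List Bool) (kernel : Int) (stride : Int) (padding : Int), Dom_compute_lengths_py seq_len down_sample_flags kernel stride padding → Pre_compute_lengths_py seq_len down_sample_flags kernel stride padding → Spec_compute_lengths_py seq_len down_sample_flags kernel stride padding (compute_lengths_py seq_len down_sample_flags kernel stride padding)

-- ===== LEMMAS AND PROOFS =====

-- the single down-sampling step, as a function (proof vocabulary only)
def clStepF (kernel stride padding L : Int) : Int :=
  PySem.Int.floordiv (L + 2 * padding - (kernel - 1) - 1) stride + 1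

-- B's table is the list of iterates of the step function
theorem clBuildTable_eq (kernel stride padding a : Int) :
    ∀ n : Nat, clBuildTable kernel stride padding a n
      = (List.range (n + 1)).map (fun i => (clStepF kernel stride padding)^[i] a) := by
  intro n
  induction n with
  | zero => simp [clBuildTable]
  | succ n ih =>
      have h1 : clBuildTable kernel stride padding a (n + 1)
          = clBuildTable kernel stride padding a n
            ++ [clStepF kernel stride padding ((clBuildTable kernel stride padding a n).getLast!)] := by
        simp [clBuildTable, List.range_succ, clStepF]
      rw [h1, ih]
      have hlast : (((List.range (n + 1)).map (fun i => (clStepF kernel stride padding)^[i] a)).getLast!)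
          = (clStepF kernel stride padding)^[n] a := by
        rw [List.range_succ]
        simp
      rw [hlast, List.range_succ (n := n + 1)]
      simp [Function.iterate_succ_apply']

theorem clTable_getD (kernel stride padding a : Int) (n c : Nat) (h : c ≤ n) :
    (clBuildTable kernel stride padding a n).getD c 0 = (clStepF kernel stride padding)^[c] a := by
  rw [clBuildTable_eq]
  have hc : c < ((List.range (n + 1)).map (fun i => (clStepF kernel stride padding)^[i] a)).length := by
    simp; omega
  rw [List.getD_eq_getElem _ _ hc]
  simp only [List.getElem_map, List.getElem_range]

-- the two folds agree given the table/iterate invariant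
theorem clFold_eq (kernel stride padding a : Int) (n : Nat) :
    ∀ (flags : List Bool) (pre : List Int) (c : Nat),
      c + flags.countP (fun f => f) ≤ n →
      (flags.foldl
        (fun (st : List Int × Int) flag =>
          let length := if flag then PySem.Int.floordiv (st.2 + 2 * padding - (kernel - 1) - 1) stride + 1 else st.2
          (st.1 ++ [length], length))
        (pre, (clStepF kernel stride padding)^[c] a)).1
      = (flags.foldl
        (fun (st : List Int × Nat) flag =>
          let c' := if flag then st.2 + 1 else st.2
          (st.1 ++ [(clBuildTable kernel stride padding a n).getD c' 0], c'))
        (pre, c)).1 := by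
  intro flags
  induction flags with
  | nil => intro pre c _; simp
  | cons flag fs ih =>
      intro pre c hc
      cases flag with
      | false =>
          simp only [List.foldl_cons, Bool.false_eq_true, if_false]
          have ht : (clBuildTable kernel stride padding a n).getD c 0
              = (clStepF kernel stride padding)^[c] a :=
            clTable_getD _ _ _ _ _ _ (by simp [List.countP_cons] at hc; omega)
          rw [ht]
          exact ih (pre ++ [(clStepF kernel stride padding)^[c] a]) c
            (by simp [List.countP_cons] at hc ⊢; omega)
      | true =>
          simp only [List.foldl_cons, reduceIte]
          have hstep : PySem.Int.floordiv ((clStepF kernel stride padding)^[c] a + 2 * padding - (kernel - 1) - 1) stride + 1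
              = (clStepF kernel stride padding)^[c + 1] a := by
            rw [Function.iterate_succ_apply']
            rfl
          have hc1 : c + 1 ≤ n := by simp [List.countP_cons] at hc; omega
          have ht : (clBuildTable kernel stride padding a n).getD (c + 1) 0
              = (clStepF kernel stride padding)^[c + 1] a :=
            clTable_getD _ _ _ _ _ _ hc1
          rw [hstep, ht]
          exact ih (pre ++ [(clStepF kernel stride padding)^[c + 1] a]) (c + 1)
            (by simp [List.countP_cons] at hc ⊢; omega)

theorem compute_lengths_py_spec : Claim_equal_compute_lengths_py := by
  intro seq_len flags kernel stride padding _ _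
  unfold Spec_compute_lengths_py
  have h0 : (clBuildTable kernel stride padding seq_len (flags.countP (fun f => f))).getD 0 0 = seq_len := by
    have := clTable_getD kernel stride padding seq_len (flags.countP (fun f => f)) 0 (Nat.zero_le _)
    simpa using this
  have key := clFold_eq kernel stride padding seq_len (flags.countP (fun f => f)) flags [seq_len] 0 (by omega)
  simp only [Function.iterate_zero_apply] at key
  simp only [compute_lengths_py, compute_lengths_py_alt, h0]
  simpa using key
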